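-- pv_equiv track=rewrite | github.com/fernandoabel/AdventOfCode2024 | Day2.py | check_report
-- ===== SOURCE A (Python) =====
-- def check_report(levels):
--     levels_safe = list()
--     safe = [True]
--
--     increasing = None
--     for i in range(len(levels) - 1):
--         safe = True
--         if (levels[i] > levels[i + 1] and increasing == False) or (levels[i] < levels[i + 1] and increasing == True):
--             safe = False
--         if abs(levels[i] - levels[i + 1]) > 3 or abs(levels[i] - levels[i + 1]) < 1:
--             safe = False
--
--         increasing = levels[i] > levels[i + 1]
--         levels_safe.append(safe)
--
--     return levels_safe
-- ===== SOURCE B (Python) =====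
-- def check_report(levels):
--     # Each pair's verdict is purely local (levels[i-1..i+1]), so compute the
--     # verdict list by divide and conquer over the pair-index interval.
--     def verdict(i):
--         ok = 1 <= abs(levels[i] - levels[i + 1]) <= 3
--         if i > 0:
--             ok = ok and (levels[i] > levels[i + 1]) == (levels[i - 1] > levels[i])
--         return ok
--
--     def solve(lo, hi):
--         if hi - lo == 1:
--             return [verdict(lo)]
--         mid = (lo + hi) // 2
--         return solve(lo, mid) + solve(mid, hi)
--
--     n = len(levels)
--     return solve(0, n - 1) if n >= 2 else []
-- ===== Notes on version B (the rewrite author's own statement) =====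
-- stated objective: alternative
-- what changed: Replaces A's left-to-right loop with a rolling Optional direction state by a divide-and-conquer recursion over the pair-index interval: each pair's verdict is computed from a purely local formula on levels[i-1..i+1] (magnitude in [1,3] and same sign as the previous pair), and the halves' verdict lists are concatenated.
import Mathlib
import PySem

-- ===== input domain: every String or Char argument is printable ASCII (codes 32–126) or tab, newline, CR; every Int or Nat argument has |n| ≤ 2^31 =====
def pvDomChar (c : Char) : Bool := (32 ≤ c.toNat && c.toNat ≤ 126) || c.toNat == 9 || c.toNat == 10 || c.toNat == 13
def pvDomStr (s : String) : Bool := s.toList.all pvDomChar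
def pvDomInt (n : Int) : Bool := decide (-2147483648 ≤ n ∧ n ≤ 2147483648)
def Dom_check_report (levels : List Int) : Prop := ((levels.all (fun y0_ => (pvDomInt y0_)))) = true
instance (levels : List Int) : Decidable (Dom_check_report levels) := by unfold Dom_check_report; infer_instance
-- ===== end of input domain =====

-- B replaces A's stateful left-to-right loop by a divide-and-conquer recursion over pair
-- indices with a purely local per-pair verdict (alternative decomposition, no speed claim).

-- ===== PORT A =====
-- literal port of A: index loop over range(len(levels)-1) carrying (increasing, levels_safe);
-- indices are always in range, so levels[i] is ported as pyGetD (exact on reachable indices)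
def check_report (levels : List Int) : List Bool :=
  (PySem.List.pyRange 0 ((levels.length : Int) - 1) 1).foldl
    (fun (st : Option Bool × List Bool) i =>
      let x := PySem.List.pyGetD levels i 0
      let y := PySem.List.pyGetD levels (i + 1) 0
      let safe := true
      let safe := if (decide (x > y) && (st.1 == some false)) ||
                     (decide (x < y) && (st.1 == some true)) then false else safe
      let safe := if 3 < (x - y).natAbs ∨ (x - y).natAbs < 1 then false else safe
      (some (decide (x > y)), st.2 ++ [safe]))
    (none, [])
  |>.2

-- ===== PORT B =====
-- literal port of Source B's local verdict(i) (indices reachable by solve are in range: pyGetD exact)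
def pvVerdict (levels : List Int) (i : Int) : Bool :=
  let x := PySem.List.pyGetD levels i 0
  let y := PySem.List.pyGetD levels (i + 1) 0
  let ok := decide (1 ≤ (x - y).natAbs ∧ (x - y).natAbs ≤ 3)
  if i > 0 then
    ok && (decide (x > y) == decide (PySem.List.pyGetD levels (i - 1) 0 > x))
  else ok

-- mid-point bounds for the divide-and-conquer split (used by pvSolve's termination proof)
theorem pvMid_bounds (lo hi : Int) (h : 2 ≤ hi - lo) :
    lo + 1 ≤ PySem.Int.floordiv (lo + hi) 2 ∧ PySem.Int.floordiv (lo + hi) 2 + 1 ≤ hi := by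
  constructor
  · rw [PySem.Int.le_floordiv_iff_mul_le (by norm_num)]; omega
  · have := (PySem.Int.floordiv_lt_iff_lt_mul (a := lo + hi) (b := 2) (q := hi)
      (by norm_num)).mpr (by omega)
    omega

-- literal port of Source B's solve(lo, hi); Python's base case is hi - lo == 1, and solve is only
-- reached with 1 ≤ hi - lo; the '≤ 1' guard only makes the unreachable hi - lo < 1 case total
def pvSolve (levels : List Int) (lo hi : Int) : List Bool :=
  if _h : hi - lo ≤ 1 then [pvVerdict levels lo]
  else
    pvSolve levels lo (PySem.Int.floordiv (lo + hi) 2) ++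
    pvSolve levels (PySem.Int.floordiv (lo + hi) 2) hi
termination_by (hi - lo).toNat
decreasing_by
  · have := pvMid_bounds lo hi (by omega); omega
  · have := pvMid_bounds lo hi (by omega); omega

def check_report_alt (levels : List Int) : List Bool :=
  if 2 ≤ levels.length then pvSolve levels 0 ((levels.length : Int) - 1) else []

-- ===== PRECONDITION & SPEC =====
def Spec_check_report (levels : List Int) (out : List Bool) : Prop := out = check_report_alt levels
instance (levels : List Int) (out : List Bool) : Decidable (Spec_check_report levels out) := by unfold Spec_check_report; infer_instance

-- ===== CLAIM (what is proved, stated in full; the proofs are below) =====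
def Claim_equal_check_report : Prop := ∀ (levels : List Int), Dom_check_report levels → Spec_check_report levels (check_report levels)

-- ===== LEMMAS AND PROOFS =====

-- state of A's loop after processing indices 0..k-1
def sA (levels : List Int) (k : Nat) : Option Bool :=
  if k = 0 then none else some (decide (levels.getD (k - 1) 0 > levels.getD k 0))

-- value A appends at index j
def elemA (levels : List Int) (j : Nat) : Bool :=
  let x := levels.getD j 0
  let y := levels.getD (j + 1) 0
  let safe := if (decide (x > y) && (sA levels j == some false)) ||
                 (decide (x < y) && (sA levels j == some true)) then false else true
  if 3 < (x - y).natAbs ∨ (x - y).natAbs < 1 then false else safe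

-- A's loop invariant: after folding indices 0..k-1 the state is (sA k, values at 0..k-1)
theorem A_inv (levels : List Int) (k : Nat) :
    (PySem.List.pyRange 0 (k : Int) 1).foldl
      (fun (st : Option Bool × List Bool) i =>
        let x := PySem.List.pyGetD levels i 0
        let y := PySem.List.pyGetD levels (i + 1) 0
        let safe := true
        let safe := if (decide (x > y) && (st.1 == some false)) ||
                       (decide (x < y) && (st.1 == some true)) then false else safe
        let safe := if 3 < (x - y).natAbs ∨ (x - y).natAbs < 1 then false else safe
        (some (decide (x > y)), st.2 ++ [safe]))
      (none, [])
    = (sA levels k, (List.range k).map (elemA levels)) := by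
  induction k with
  | zero => simp [sA]
  | succ k ih =>
    have hcast : ((k + 1 : Nat) : Int) = (k : Int) + 1 := by push_cast; ring
    rw [hcast, PySem.List.pyRange_one_succ_right (by positivity), List.foldl_append, ih]
    have hg1 : PySem.List.pyGetD levels (k : Int) 0 = levels.getD k 0 :=
      PySem.List.pyGetD_natCast levels k 0
    have hg2 : PySem.List.pyGetD levels ((k : Int) + 1) 0 = levels.getD (k + 1) 0 := by
      rw [← hcast]; exact PySem.List.pyGetD_natCast levels (k + 1) 0
    simp only [List.foldl_cons, List.foldl_nil, hg1, hg2]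
    rw [List.range_succ, List.map_append]
    simp [sA, elemA]

theorem A_char (levels : List Int) :
    check_report levels = (List.range (levels.length - 1)).map (elemA levels) := by
  cases levels with
  | nil => simp [check_report, PySem.List.pyRange_one_eq_nil]
  | cons a l =>
    unfold check_report
    have h : ((a :: l).length : Int) - 1 = (((a :: l).length - 1 : Nat) : Int) := by simp
    rw [h, A_inv]

-- divide and conquer produces the verdict of every pair index in [lo, hi), in order
theorem pvSolve_eq (levels : List Int) (lo hi : Int) (h : lo < hi) :
    pvSolve levels lo hi = (PySem.List.pyRange lo hi 1).map (pvVerdict levels) := by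
  by_cases hb : hi - lo ≤ 1
  · have : hi = lo + 1 := by omega
    subst this
    rw [pvSolve, dif_pos hb, PySem.List.pyRange_one_singleton]
    simp
  · obtain ⟨h1, h2⟩ := pvMid_bounds lo hi (by omega)
    rw [pvSolve, dif_neg hb,
      pvSolve_eq levels lo _ (by omega), pvSolve_eq levels _ hi (by omega),
      PySem.List.pyRange_one_append lo (PySem.Int.floordiv (lo + hi) 2) hi (by omega) (by omega),
      List.map_append]
termination_by (hi - lo).toNat
decreasing_by
  · have := pvMid_bounds lo hi (by omega); omega
  · have := pvMid_bounds lo hi (by omega); omega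

-- A's per-index value agrees with B's local verdict
theorem elemA_eq_verdict (levels : List Int) (j : Nat) :
    elemA levels j = pvVerdict levels ((j : Nat) : Int) := by
  have hg : PySem.List.pyGetD levels (j : Int) 0 = levels.getD j 0 :=
    PySem.List.pyGetD_natCast levels j 0
  have hg1 : PySem.List.pyGetD levels ((j : Int) + 1) 0 = levels.getD (j + 1) 0 := by
    rw [show ((j : Int) + 1) = ((j + 1 : Nat) : Int) from by push_cast; ring]
    exact PySem.List.pyGetD_natCast levels (j + 1) 0
  rcases Nat.eq_zero_or_pos j with hj | hj
  · subst hj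
    have h0 : PySem.List.pyGetD levels (0 : Int) 0 = levels.getD 0 0 := by
      exact_mod_cast PySem.List.pyGetD_natCast levels 0 0
    have h1 : PySem.List.pyGetD levels (1 : Int) 0 = levels.getD 1 0 := by
      exact_mod_cast PySem.List.pyGetD_natCast levels 1 0
    simp only [elemA, pvVerdict, sA, Nat.cast_zero, zero_add, h0, h1,
      if_neg (lt_irrefl (0 : Int))]
    set x := levels.getD 0 0; set y := levels.getD 1 0
    by_cases hm : 3 < (x - y).natAbs ∨ (x - y).natAbs < 1
    · rw [if_pos hm]; have : ¬ (1 ≤ (x - y).natAbs ∧ (x - y).natAbs ≤ 3) := by omega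
      simp [this]
    · rw [if_neg hm]; have : (1 ≤ (x - y).natAbs ∧ (x - y).natAbs ≤ 3) := by omega
      simp [this]
  · have hj0 : j ≠ 0 := Nat.pos_iff_ne_zero.mp hj
    have hgp : PySem.List.pyGetD levels ((j : Int) - 1) 0 = levels.getD (j - 1) 0 := by
      rw [show ((j : Int) - 1) = ((j - 1 : Nat) : Int) from by omega]
      exact PySem.List.pyGetD_natCast levels (j - 1) 0
    have hjp : (0 : Int) < (j : Int) := by exact_mod_cast hj
    simp only [elemA, pvVerdict, sA, if_neg hj0, hg, hg1, hgp, if_pos hjp]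
    set x := levels.getD j 0; set y := levels.getD (j + 1) 0; set p := levels.getD (j - 1) 0
    by_cases hm : 3 < (x - y).natAbs ∨ (x - y).natAbs < 1
    · rw [if_pos hm]; have : ¬ (1 ≤ (x - y).natAbs ∧ (x - y).natAbs ≤ 3) := by omega
      simp [this]
    · rw [if_neg hm]
      have hmag : (1 ≤ (x - y).natAbs ∧ (x - y).natAbs ≤ 3) := by omega
      have hxy : x ≠ y := by intro h; omega
      rcases lt_or_gt_of_ne hxy with h | h
      · have h1 : ¬ x > y := by omega
        by_cases h2 : p > x <;> simp [h1, h, h2, hmag]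
      · have h1 : ¬ x < y := by omega
        by_cases h2 : p > x <;> simp [h1, h, h2, hmag]

theorem B_char (levels : List Int) :
    check_report_alt levels = (List.range (levels.length - 1)).map
      (fun j => pvVerdict levels ((j : Nat) : Int)) := by
  unfold check_report_alt
  by_cases hn : 2 ≤ levels.length
  · rw [if_pos hn, pvSolve_eq levels 0 _ (by omega), PySem.List.pyRange_one]
    have : (((levels.length : Int) - 1) - 0).toNat = levels.length - 1 := by omega
    rw [this, List.map_map]
    exact List.map_congr_left (fun j _ => by simp)
  · rw [if_neg hn]
    have : levels.length - 1 = 0 := by omega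
    simp [this]

-- ===== VERDICT (by name: the statement is the Claim_ definition above) =====
theorem check_report_spec : Claim_equal_check_report := by
  intro levels _
  unfold Spec_check_report
  rw [A_char, B_char]
  exact List.map_congr_left (fun j _ => elemA_eq_verdict levels j)
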